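-- pv_equiv track=rewrite | github.com/ruppysuppy/Daily-Coding-Problem-Solutions | Solutions/121.py | can_make_palindrome
-- ===== SOURCE A (Python) =====
-- def is_palindrome(string):
--     return (string == string[::-1])
--
-- def can_make_palindrome(string, k):
--     # base case 1 for recursion: if the string is a palindrome, True is returned
--     if (is_palindrome(string)):
--         return True
--
--     # base case 2 for recursion: if k = 0, False is returned
--     if (not k):
--         return False
--
--     # iterating over the string
--     for i in range(len(string)):
--         # testing all string if they are palindrome (eleminating the i'th character)
--         # recursively called function, so all possible combinations of removing k characters will be found till one is palindrome
--         # if a palindrome is encountered, True is returned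
--         if (can_make_palindrome(string[:i] + string[i+1:], k-1)):
--             return True
--
--     # if no palindrome can be formed, False is returned
--     return False
-- ===== SOURCE B (Python) =====
-- def can_make_palindrome(string, k):
--     n = len(string)
--     if n < 2:
--         return 0 <= k
--     prev2 = [0] * (n + 1)   # minimal removals for substrings of length L - 2
--     prev = [0] * n          # minimal removals for substrings of length L - 1
--     for length in range(2, n + 1):
--         cur = []
--         for i in range(n - length + 1):
--             if string[i] == string[i + length - 1]:
--                 cur.append(prev2[i + 1])
--             else:
--                 cur.append(1 + min(prev[i + 1], prev[i]))
--         prev2, prev = prev, cur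
--     return prev[0] <= k
-- ===== Notes on version B (the rewrite author's own statement) =====
-- stated objective: faster
-- what changed: A recursively tries deleting every one of the n characters at every level and checks each candidate for palindromicity; B computes the exact minimal number of removals with a bottom-up two-row interval DP (match the end characters or pay 1 and shrink one end) and compares it with k. Intended as faster (O(n^2) vs exponential); measured 69.7x at n=16, and A timed out at n=64 where B returned.
-- intended difference: For k < 0, A returns True on every string (its 'not k' test only catches k == 0, so the recursion deletes characters all the way down to a trivial palindrome), while B returns False because the minimal number of removals can never be at most a negative budget, which is the intended meaning of 'remove at most k characters'. — e.g. on can_make_palindrome("ab", -1): A returns true, B returns false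
import Mathlib
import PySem

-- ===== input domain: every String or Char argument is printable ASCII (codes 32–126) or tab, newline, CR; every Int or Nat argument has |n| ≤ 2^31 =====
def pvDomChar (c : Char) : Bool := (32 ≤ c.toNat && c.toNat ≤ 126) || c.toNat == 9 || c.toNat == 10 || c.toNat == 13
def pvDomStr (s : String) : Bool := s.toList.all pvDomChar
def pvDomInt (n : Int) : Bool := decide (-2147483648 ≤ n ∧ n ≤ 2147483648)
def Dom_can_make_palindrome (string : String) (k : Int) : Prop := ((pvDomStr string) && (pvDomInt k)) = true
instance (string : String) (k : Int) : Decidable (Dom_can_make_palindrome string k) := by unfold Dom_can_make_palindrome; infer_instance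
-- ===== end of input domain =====

-- B replaces A's brute-force try-every-deletion search by a bottom-up interval DP computing the exact
-- minimal number of removals, compared with k; on k < 0 (stated in D_ below) B returns False where A
-- accidentally returns True.  Return values only; neither program mutates its arguments.

-- ===== PORT A =====
-- fuel-guarded transliteration of A's recursion (the fuel only makes the same computation total:
-- every recursive call is on a one-shorter string, so fuel = length + 1 is never exhausted)
def can_make_palindrome_rec : Nat → List Char → Int → Bool
  | 0, _, _ => false
  | fuel + 1, l, k =>
    -- if (is_palindrome(string)): return True     (is_palindrome: string == string[::-1])
    if l = l.reverse then true
    -- if (not k): return False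
    else if k = 0 then false
    -- for i in range(len(string)): if can_make_palindrome(string[:i] + string[i+1:], k-1): return True
    else (List.range l.length).attach.any (fun i =>
      can_make_palindrome_rec fuel
        (PySem.List.slice l none (some ((i.1 : Nat) : Int)) ++
         PySem.List.slice l (some (((i.1 : Nat) : Int) + 1)) none) (k - 1))

def can_make_palindrome (string : String) (k : Int) : Bool :=
  can_make_palindrome_rec (string.toList.length + 1) string.toList k

-- ===== PORT B =====
-- transliteration of Source B's two-row DP: prev2 / prev hold the minimal-removal counts for substrings
-- of lengths length-2 / length-1; the loop over `length in range(2, n+1)` is the outer foldl, the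
-- appending inner loop over `i in range(n - length + 1)` is the foldl inside pv_inner; [0]*(n+1) is
-- List.replicate, and every indexing string[...] / prev[...] is PySem.List.pyGetD (always in range).

def pv_inner (cs : List Char) (n L : Int) (prev2 prev : List Int) : List Int :=
  (PySem.List.pyRange 0 (n - L + 1) 1).foldl (fun cur i =>
    cur ++ [ if PySem.List.pyGetD cs i ' ' = PySem.List.pyGetD cs (i + L - 1) ' '
             then PySem.List.pyGetD prev2 (i + 1) 0
             else 1 + min (PySem.List.pyGetD prev (i + 1) 0) (PySem.List.pyGetD prev i 0) ]) []

def can_make_palindrome_alt (string : String) (k : Int) : Bool :=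
  if (string.toList.length : Int) < 2 then decide ((0 : Int) ≤ k)
  else
    decide (PySem.List.pyGetD
      (((PySem.List.pyRange 2 ((string.toList.length : Int) + 1) 1).foldl
        (fun (p : List Int × List Int) L => (p.2, pv_inner string.toList (string.toList.length : Int) L p.1 p.2))
        (List.replicate (string.toList.length + 1) (0 : Int), List.replicate string.toList.length (0 : Int))).2)
      0 0 ≤ k)


-- ===== PRECONDITION & SPEC =====
-- For k < 0, A returns True on every string (its `not k` test only catches k == 0, so the recursion
-- keeps deleting characters down to a trivial palindrome), while B returns False because the minimal
-- number of removals can never be ≤ a negative budget — the intended meaning of "remove at most k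
-- characters".
def D_can_make_palindrome (string : String) (k : Int) : Prop := k < 0
instance (string : String) (k : Int) : Decidable (D_can_make_palindrome string k) := by
  unfold D_can_make_palindrome; infer_instance

def Spec_can_make_palindrome (string : String) (k : Int) (out : Bool) : Prop :=
  ¬ D_can_make_palindrome string k → out = can_make_palindrome_alt string k
instance (string : String) (k : Int) (out : Bool) : Decidable (Spec_can_make_palindrome string k out) := by
  unfold Spec_can_make_palindrome; infer_instance

def pvDiffWitness_can_make_palindrome : String × Int := ("ab", -1)
def pvDiffWitnessOut_can_make_palindrome : Bool × Bool := (true, false)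

-- ===== CLAIM (what is proved, stated in full; the proofs are below) =====
def Claim_unchanged_can_make_palindrome : Prop := ∀ (string : String) (k : Int), Dom_can_make_palindrome string k → Spec_can_make_palindrome string k (can_make_palindrome string k)
def Claim_changed_can_make_palindrome : Prop := Dom_can_make_palindrome (pvDiffWitness_can_make_palindrome.1) (pvDiffWitness_can_make_palindrome.2) ∧ D_can_make_palindrome (pvDiffWitness_can_make_palindrome.1) (pvDiffWitness_can_make_palindrome.2) ∧ can_make_palindrome (pvDiffWitness_can_make_palindrome.1) (pvDiffWitness_can_make_palindrome.2) = pvDiffWitnessOut_can_make_palindrome.1 ∧ can_make_palindrome_alt (pvDiffWitness_can_make_palindrome.1) (pvDiffWitness_can_make_palindrome.2) = pvDiffWitnessOut_can_make_palindrome.2 ∧ pvDiffWitnessOut_can_make_palindrome.1 ≠ pvDiffWitnessOut_can_make_palindrome.2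
def Claim_exact_can_make_palindrome : Prop := ∀ (string : String) (k : Int), Dom_can_make_palindrome string k → D_can_make_palindrome string k → can_make_palindrome string k ≠ can_make_palindrome_alt string k

-- ===== LEMMAS AND PROOFS =====

-- the minimal number of single-character removals turning l into a palindrome (proof-side
-- specification: Source B's two-ended recursion, fuel-guarded; both ports are related to it)
def min_del_rec : Nat → List Char → Nat
  | 0, _ => 0
  | _ + 1, [] => 0
  | _ + 1, [_] => 0
  | fuel + 1, a :: b :: t =>
    if a = (b :: t).getLast (by simp) then min_del_rec fuel ((b :: t).dropLast)
    else 1 + min (min_del_rec fuel (b :: t)) (min_del_rec fuel ((a :: b :: t).dropLast))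

def min_del (l : List Char) : Nat := min_del_rec l.length l

theorem min_del_small (l : List Char) (h : l.length ≤ 1) : min_del l = 0 := by
  match l with
  | [] => rfl
  | [x] => rfl


-- min_del_rec ignores the fuel as long as it is at least the length
theorem min_del_rec_congr : ∀ (f g : Nat) (l : List Char), l.length ≤ f → l.length ≤ g →
    min_del_rec f l = min_del_rec g l := by
  intro f
  induction f with
  | zero =>
    intro g l hf _
    have : l = [] := by cases l <;> simp_all
    subst this; cases g <;> rfl
  | succ f ih =>
    intro g l hf hg
    match g, l with
    | 0, l => have : l = [] := by cases l <;> simp_all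
              subst this; rfl
    | g + 1, [] => rfl
    | g + 1, [x] => rfl
    | g + 1, a :: b :: t =>
      simp only [min_del_rec]
      have h1 : ((b :: t).dropLast).length ≤ f := by simp at hf ⊢; omega
      have h1' : ((b :: t).dropLast).length ≤ g := by simp at hg ⊢; omega
      have h2 : (b :: t).length ≤ f := by simp at hf ⊢; omega
      have h2' : (b :: t).length ≤ g := by simp at hg ⊢; omega
      have h3 : ((a :: b :: t).dropLast).length ≤ f := by simp at hf ⊢; omega
      have h3' : ((a :: b :: t).dropLast).length ≤ g := by simp at hg ⊢; omega
      rw [ih g _ h1 h1', ih g _ h2 h2', ih g _ h3 h3']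

-- recursion equation for min_del on the decomposition a :: (m ++ [z])
theorem min_del_eq (a z : Char) (m : List Char) :
    min_del (a :: (m ++ [z])) =
      if a = z then min_del m else 1 + min (min_del (m ++ [z])) (min_del (a :: m)) := by
  have hlen : (a :: (m ++ [z])).length = m.length + 2 := by simp
  cases m with
  | nil => simp [min_del, min_del_rec]
  | cons b t =>
    unfold min_del
    rw [hlen]
    show min_del_rec (((b :: t).length) + 2) (a :: (b :: t) ++ [z]) = _
    simp only [List.cons_append, min_del_rec]
    simp only [← List.cons_append]
    rw [List.getLast_concat]
    by_cases haz : a = z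
    · simp only [if_pos haz]
      rw [List.dropLast_concat]
      apply min_del_rec_congr <;> simp
    · simp only [if_neg haz]
      rw [List.dropLast_concat]
      have e1 : min_del_rec ((b :: t).length + 1) ((b :: t) ++ [z]) = min_del ((b :: t) ++ [z]) := by
        apply min_del_rec_congr <;> simp
      have e2 : min_del_rec ((b :: t).length + 1) (a :: b :: t) = min_del (a :: b :: t) := by
        apply min_del_rec_congr <;> simp
      rw [e1, e2]
      simp only [min_del]

theorem pal_decomp (a z : Char) (m : List Char) :
    a :: (m ++ [z]) = (a :: (m ++ [z])).reverse ↔ (a = z ∧ m = m.reverse) := by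
  constructor
  · intro h
    have hrev : (a :: (m ++ [z])).reverse = z :: (m.reverse ++ [a]) := by simp
    rw [hrev] at h
    have h1 : a = z := by injection h
    have h2 : m ++ [z] = m.reverse ++ [a] := by injection h
    refine ⟨h1, ?_⟩
    subst h1
    exact Eq.symm (List.append_inj_left' (id (Eq.symm h2)) rfl)
  · rintro ⟨rfl, hm⟩
    conv_lhs => rw [hm]
    simp

theorem len2_decomp (l : List Char) (h : 2 ≤ l.length) : ∃ a m z, l = a :: (m ++ [z]) := by
  match l with
  | a :: b :: t =>
    refine ⟨a, (b :: t).dropLast, (b :: t).getLast (by simp), ?_⟩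
    simp [List.dropLast_concat_getLast]

theorem small_pal (l : List Char) (h : l.length ≤ 1) : l = l.reverse := by
  match l with
  | [] => rfl
  | [x] => rfl

theorem erase_last (m : List Char) (z : Char) : (m ++ [z]).eraseIdx m.length = m := by
  simp [List.eraseIdx_eq_take_drop_succ]

theorem erase_mid (a z : Char) (m : List Char) (j : Nat) (hj : j < m.length) :
    (a :: (m ++ [z])).eraseIdx (j + 1) = a :: (m.eraseIdx j ++ [z]) := by
  rw [List.eraseIdx_cons_succ, List.eraseIdx_append_of_lt_length hj]

theorem erase_end (a z : Char) (m : List Char) :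
    (a :: (m ++ [z])).eraseIdx (m.length + 1) = a :: m := by
  rw [List.eraseIdx_cons_succ, erase_last]

theorem min_del_zero_iff : ∀ (n : Nat) (l : List Char), l.length = n → (min_del l = 0 ↔ l = l.reverse) := by
  intro n
  induction n using Nat.strong_induction_on with
  | _ n ih =>
    intro l hl
    by_cases h2 : 2 ≤ l.length
    · obtain ⟨a, m, z, rfl⟩ := len2_decomp l h2
      have hlm : (a :: (m ++ [z])).length = m.length + 2 := by simp
      rw [min_del_eq, pal_decomp]
      by_cases haz : a = z
      · rw [if_pos haz]
        have hm := ih m.length (by omega) m rfl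
        constructor
        · intro h0; exact ⟨haz, hm.mp h0⟩
        · rintro ⟨_, hmm⟩; exact hm.mpr hmm
      · rw [if_neg haz]
        constructor
        · intro h0; omega
        · rintro ⟨hc, _⟩; exact absurd hc haz
    · constructor
      · intro _; exact small_pal l (by omega)
      · intro _
        match l with
        | [] => rfl
        | [x] => rfl
        | a :: b :: t => simp at h2

-- deleting one character changes the minimal removal count by at most one (both directions)
theorem min_del_erase : ∀ (n : Nat) (l : List Char), l.length = n → ∀ i, i < l.length →
    min_del (l.eraseIdx i) ≤ min_del l + 1 ∧ min_del l ≤ min_del (l.eraseIdx i) + 1 := by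
  intro n
  induction n using Nat.strong_induction_on with
  | _ n ih =>
    intro l hl i hi
    by_cases h2 : 2 ≤ l.length
    · obtain ⟨a, m, z, rfl⟩ := len2_decomp l h2
      have hlm : (a :: (m ++ [z])).length = m.length + 2 := by simp
      have I1 := ih (m ++ [z]).length (by simp; omega) (m ++ [z]) rfl m.length (by simp)
      rw [erase_last] at I1
      have I2 := ih (a :: m).length (by simp; omega) (a :: m) rfl 0 (by simp)
      rw [List.eraseIdx_cons_zero] at I2
      rcases Nat.lt_trichotomy i 0 with h0 | h0 | h0
      · omega
      · subst h0
        rw [List.eraseIdx_cons_zero]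
        by_cases haz : a = z
        · rw [min_del_eq, if_pos haz]; omega
        · rw [min_del_eq, if_neg haz]; omega
      · obtain ⟨j, rfl⟩ : ∃ j, i = j + 1 := ⟨i - 1, by omega⟩
        rcases Nat.lt_trichotomy j m.length with hj | hj | hj
        · rw [erase_mid a z m j hj]
          have I3 := ih m.length (by omega) m rfl j hj
          have I4 := ih (m ++ [z]).length (by simp; omega) (m ++ [z]) rfl j (by simp; omega)
          rw [List.eraseIdx_append_of_lt_length hj] at I4
          by_cases haz : a = z
          · rw [min_del_eq, if_pos haz, min_del_eq, if_pos haz]; omega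
          · have I5 := ih (a :: m).length (by simp; omega) (a :: m) rfl (j + 1) (by simp; omega)
            rw [List.eraseIdx_cons_succ] at I5
            rw [min_del_eq, if_neg haz, min_del_eq, if_neg haz]; omega
        · subst hj
          rw [erase_end]
          by_cases haz : a = z
          · rw [min_del_eq, if_pos haz]; omega
          · rw [min_del_eq, if_neg haz]; omega
        · rw [hlm] at hi; omega
    · match l with
      | [] => simp at hi
      | [x] =>
        simp at hi; subst hi
        simp [min_del, min_del_rec]
      | a :: b :: t => simp at h2

-- a non-palindrome always has a single deletion that lowers the minimal removal count by one
theorem min_del_dec : ∀ (n : Nat) (l : List Char), l.length = n → l ≠ l.reverse →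
    ∃ i, i < l.length ∧ min_del (l.eraseIdx i) + 1 = min_del l := by
  intro n
  induction n using Nat.strong_induction_on with
  | _ n ih =>
    intro l hl hpal
    have h2 : 2 ≤ l.length := by
      by_contra h
      exact hpal (small_pal l (by omega))
    obtain ⟨a, m, z, rfl⟩ := len2_decomp l h2
    have hlm : (a :: (m ++ [z])).length = m.length + 2 := by simp
    by_cases haz : a = z
    · have hmpal : m ≠ m.reverse := by
        intro hmm; exact hpal ((pal_decomp a z m).mpr ⟨haz, hmm⟩)
      obtain ⟨j, hj, hjeq⟩ := ih m.length (by omega) m rfl hmpal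
      refine ⟨j + 1, by omega, ?_⟩
      rw [erase_mid a z m j hj, min_del_eq, if_pos haz, min_del_eq, if_pos haz, hjeq]
    · rw [min_del_eq, if_neg haz]
      rcases Nat.le_total (min_del (m ++ [z])) (min_del (a :: m)) with hle | hle
      · refine ⟨0, by omega, ?_⟩
        rw [List.eraseIdx_cons_zero]
        omega
      · refine ⟨m.length + 1, by omega, ?_⟩
        rw [erase_end]
        omega

-- the argument of A's recursive call, string[:i] + string[i+1:], is eraseIdx
theorem pv_slice_erase (l : List Char) (i : Nat) (h : i < l.length) :
    PySem.List.slice l none (some ((i : Nat) : Int)) ++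
      PySem.List.slice l (some (((i : Nat) : Int) + 1)) none = l.eraseIdx i := by
  have h1 : (((i : Nat) : Int) + 1) = (((i + 1 : Nat)) : Int) := by push_cast; ring
  rw [h1, PySem.List.slice_to_natCast, PySem.List.slice_from_natCast,
    List.eraseIdx_eq_take_drop_succ]

-- A's search succeeds exactly when the minimal removal count fits the (non-negative) budget
theorem aRec_iff : ∀ (fuel : Nat) (l : List Char) (k : Int), l.length < fuel → 0 ≤ k →
    (can_make_palindrome_rec fuel l k = true ↔ (min_del l : Int) ≤ k) := by
  intro fuel
  induction fuel with
  | zero => intro l k h _; omega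
  | succ fuel ih =>
    intro l k hlen hk
    by_cases hpal : l = l.reverse
    · have h0 : min_del l = 0 := (min_del_zero_iff l.length l rfl).mpr hpal
      simp only [can_make_palindrome_rec]
      rw [if_pos hpal]
      simp [h0, hk]
    · have hpos : 1 ≤ l.length := by
        by_contra h
        exact hpal (small_pal l (by omega))
      have hnz : min_del l ≠ 0 := fun h0 => hpal ((min_del_zero_iff l.length l rfl).mp h0)
      by_cases hk0 : k = 0
      · subst hk0
        simp only [can_make_palindrome_rec, if_neg hpal]
        constructor
        · intro h; exact absurd h (by simp)
        · intro h; exfalso; omega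
      · simp only [can_make_palindrome_rec, if_neg hpal, if_neg hk0]
        rw [List.any_eq_true]
        constructor
        · rintro ⟨⟨i, hmem⟩, -, hfi⟩
          have hi : i < l.length := List.mem_range.mp hmem
          rw [pv_slice_erase l i hi] at hfi
          have hrec := ih (l.eraseIdx i) (k - 1)
            (by rw [List.length_eraseIdx_of_lt hi]; omega) (by omega)
          have hle := hrec.mp hfi
          have herase := (min_del_erase l.length l rfl i hi).2
          omega
        · intro hle
          obtain ⟨i, hi, hieq⟩ := min_del_dec l.length l rfl hpal
          refine ⟨⟨i, List.mem_range.mpr hi⟩, List.mem_attach _ _, ?_⟩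
          rw [pv_slice_erase l i hi]
          exact (ih (l.eraseIdx i) (k - 1)
            (by rw [List.length_eraseIdx_of_lt hi]; omega) (by omega)).mpr (by omega)

-- with a negative budget A's search always reaches a trivial palindrome
theorem aRec_neg : ∀ (fuel : Nat) (l : List Char) (k : Int), l.length < fuel → k < 0 →
    can_make_palindrome_rec fuel l k = true := by
  intro fuel
  induction fuel with
  | zero => intro l k h _; omega
  | succ fuel ih =>
    intro l k hlen hneg
    by_cases hpal : l = l.reverse
    · simp only [can_make_palindrome_rec]
      rw [if_pos hpal]
    · have hpos : 1 ≤ l.length := by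
        by_contra h
        exact hpal (small_pal l (by omega))
      simp only [can_make_palindrome_rec, if_neg hpal, if_neg (by omega : ¬k = 0)]
      rw [List.any_eq_true]
      refine ⟨⟨0, List.mem_range.mpr (by omega)⟩, List.mem_attach _ _, ?_⟩
      rw [pv_slice_erase l 0 (by omega)]
      exact ih (l.eraseIdx 0) (k - 1)
        (by rw [List.length_eraseIdx_of_lt (by omega)]; omega) (by omega)


def pvRow (cs : List Char) (L : Nat) : List Int :=
  (List.range (cs.length - L + 1)).map (fun i => ((min_del ((cs.drop i).take L) : Nat) : Int))

theorem min_del_window (cs : List Char) (i L : Nat) (h2 : 2 ≤ L) (hle : i + L ≤ cs.length) :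
    min_del ((cs.drop i).take L) =
      if cs[i]'(by omega) = cs[i + L - 1]'(by omega)
      then min_del ((cs.drop (i + 1)).take (L - 2))
      else 1 + min (min_del ((cs.drop (i + 1)).take (L - 1))) (min_del ((cs.drop i).take (L - 1))) := by
  obtain ⟨M, rfl⟩ : ∃ M, L = M + 2 := ⟨L - 2, by omega⟩
  have hdi : cs.drop i = cs[i]'(by omega) :: cs.drop (i + 1) := List.drop_eq_getElem_cons (by omega)
  have hw : (cs.drop i).take (M + 2) = cs[i]'(by omega) :: (cs.drop (i + 1)).take (M + 1) := by
    conv_lhs => rw [hdi]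
    exact List.take_succ_cons
  have hlast : (cs.drop (i + 1))[M]'(by simp; omega) = cs[i + (M + 2) - 1]'(by omega) := by
    rw [List.getElem_drop]
    congr 1
    omega
  have hu : (cs.drop (i + 1)).take (M + 1) = ((cs.drop (i + 1)).take M) ++ [cs[i + (M + 2) - 1]'(by omega)] := by
    rw [List.take_add_one]
    rw [List.getElem?_eq_getElem (by simp; omega), hlast]
    rfl
  have hw1 : (cs.drop i).take (M + 1) = cs[i]'(by omega) :: (cs.drop (i + 1)).take M := by
    conv_lhs => rw [hdi]
    exact List.take_succ_cons
  simp only [show M + 2 - 2 = M from rfl, show M + 2 - 1 = M + 1 by omega]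
  rw [hw, hu, min_del_eq, ← hu, ← hw1]

theorem pv_inner_spec (cs : List Char) (L : Nat) (h2 : 2 ≤ L) (hL : L ≤ cs.length) :
    pv_inner cs (cs.length : Int) ((L : Nat) : Int) (pvRow cs (L - 2)) (pvRow cs (L - 1)) = pvRow cs L := by
  unfold pv_inner pvRow
  rw [show ((cs.length : Int) - (L : Int) + 1) = ((cs.length - L + 1 : Nat) : Int) by omega,
    PySem.List.pyRange_zero_natCast, PySem.List.foldl_append_singleton_eq_map, List.nil_append,
    List.map_map]
  apply List.map_congr_left
  intro x hx
  have hxN : x < cs.length - L + 1 := List.mem_range.mp hx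
  have hxle : x + L ≤ cs.length := by omega
  simp only [Function.comp]
  rw [show ((x : Int) + (L : Int) - 1) = ((x + L - 1 : Nat) : Int) by omega,
    show ((x : Int) + 1) = ((x + 1 : Nat) : Int) by omega]
  simp only [PySem.List.pyGetD_natCast]
  rw [List.getD_eq_getElem cs ' ' (by omega), List.getD_eq_getElem cs ' ' (by omega : x + L - 1 < cs.length)]
  rw [min_del_window cs x L h2 hxle]
  by_cases hc : cs[x]'(by omega) = cs[x + L - 1]'(by omega)
  · rw [if_pos hc, if_pos hc]
    simp [List.getD, List.getElem?_map, List.getElem?_range (show x + 1 < cs.length - (L - 2) + 1 by omega)]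
  · rw [if_neg hc, if_neg hc]
    have r1 : x + 1 < cs.length - (L - 1) + 1 := by omega
    have r2 : x < cs.length - (L - 1) + 1 := by omega
    simp only [List.getD, List.getElem?_map, List.getElem?_range r1, List.getElem?_range r2,
      Option.getD_some, Option.map_some]
    push_cast
    omega

theorem pv_fold_spec (cs : List Char) : ∀ (j : Nat), 1 ≤ j → j ≤ cs.length →
    (PySem.List.pyRange 2 ((j : Int) + 1) 1).foldl
      (fun (p : List Int × List Int) L => (p.2, pv_inner cs (cs.length : Int) L p.1 p.2))
      (pvRow cs 0, pvRow cs 1) = (pvRow cs (j - 1), pvRow cs j) := by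
  intro j
  induction j with
  | zero => intro h _; omega
  | succ j ih =>
    intro _ hle
    by_cases hj : j = 0
    · subst hj
      rw [show ((1 : Nat) : Int) + 1 = 2 by norm_num, PySem.List.pyRange_one_eq_nil (by norm_num)]
      rfl
    · rw [show ((j + 1 : Nat) : Int) + 1 = ((j : Int) + 1) + 1 by push_cast; ring,
        PySem.List.pyRange_one_succ_right (by omega), List.foldl_append,
        ih (by omega) (by omega)]
      simp only [List.foldl_cons, List.foldl_nil]
      rw [show ((j : Int) + 1) = ((j + 1 : Nat) : Int) by push_cast; ring]
      have hstep := pv_inner_spec cs (j + 1) (by omega) hle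
      rw [show j + 1 - 2 = j - 1 by omega, show j + 1 - 1 = j from rfl] at hstep
      rw [hstep, show j + 1 - 1 = j by omega]

theorem alt_eq (s : String) (k : Int) :
    can_make_palindrome_alt s k = decide ((min_del s.toList : Int) ≤ k) := by
  unfold can_make_palindrome_alt
  by_cases h : (s.toList.length : Int) < 2
  · rw [if_pos h, min_del_small s.toList (by omega)]
    simp
  · rw [if_neg h]
    have e0 : List.replicate (s.toList.length + 1) (0 : Int) = pvRow s.toList 0 := by
      unfold pvRow
      apply List.ext_getElem (by simp)
      intro i h1 h2
      simp [min_del_small]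
    have e1 : List.replicate s.toList.length (0 : Int) = pvRow s.toList 1 := by
      unfold pvRow
      apply List.ext_getElem (by simp only [List.length_replicate, List.length_map, List.length_range]; omega)
      intro i h1 h2
      have : (List.take 1 (List.drop i s.toList)).length ≤ 1 := by simp
      simp [min_del_small _ this]
    rw [e0, e1, pv_fold_spec s.toList s.toList.length (by omega) le_rfl]
    have hrow : pvRow s.toList s.toList.length = [((min_del s.toList : Nat) : Int)] := by
      unfold pvRow
      rw [show s.toList.length - s.toList.length + 1 = 1 by omega]
      simp only [List.range_one, List.map_cons, List.map_nil, List.drop_zero, List.take_length]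
    rw [hrow]
    rfl

-- ===== VERDICT (by name: the statements are the Claim_ definitions above) =====
theorem can_make_palindrome_spec : Claim_unchanged_can_make_palindrome := by
  intro s k _ hD
  have hk : 0 ≤ k := by
    unfold D_can_make_palindrome at hD; omega
  have h := aRec_iff (s.toList.length + 1) s.toList k (by omega) hk
  unfold can_make_palindrome
  rw [alt_eq, Bool.eq_iff_iff, h]
  simp

theorem can_make_palindrome_changed : Claim_changed_can_make_palindrome := by
  unfold Claim_changed_can_make_palindrome; decide

theorem can_make_palindrome_tight : Claim_exact_can_make_palindrome := by
  intro s k _ hD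
  unfold D_can_make_palindrome at hD
  have hA := aRec_neg (s.toList.length + 1) s.toList k (by omega) hD
  unfold can_make_palindrome
  rw [hA, alt_eq]
  have : ¬ ((min_del s.toList : Int) ≤ k) := by
    have : (0 : Int) ≤ (min_del s.toList : Int) := by positivity
    omega
  simp [this]
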